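-- pv_equiv track=rewrite | github.com/rf-iasys/OEIS | OEIS_A151821.py | A151821
-- ===== SOURCE A (Python) =====
-- def A151821(n):
--     marked = []
--     current = 1
--     k = 1
--
--     while len(marked) < n:
--         k += (k+1)*current//k
--         current += current + 1
--         marked.append(k+1)
--
--     return [1] + marked
-- ===== SOURCE B (Python) =====
-- def A151821(n):
--     return [1] + [1 << i for i in range(2, n + 2)]
-- ===== Notes on version B (the rewrite author's own statement) =====
-- stated objective: faster
-- what changed: Replaces the state-threading while loop, which maintains k and current and derives each next term via a big-int multiplication and floor division, with a one-line closed form producing each power of two directly by a shift of its index.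
import Mathlib
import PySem

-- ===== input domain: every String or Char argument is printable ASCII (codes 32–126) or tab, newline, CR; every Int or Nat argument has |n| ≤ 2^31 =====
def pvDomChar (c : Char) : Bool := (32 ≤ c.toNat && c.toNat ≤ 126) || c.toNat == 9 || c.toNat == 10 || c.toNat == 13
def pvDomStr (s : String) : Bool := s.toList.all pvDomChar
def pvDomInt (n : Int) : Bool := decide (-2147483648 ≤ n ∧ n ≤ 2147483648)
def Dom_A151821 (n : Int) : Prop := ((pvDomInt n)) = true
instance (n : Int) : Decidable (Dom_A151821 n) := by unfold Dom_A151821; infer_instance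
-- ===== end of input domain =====

-- B replaces A's k/current state-threading loop with a direct closed form (a shift per index), measurably faster.
-- ===== PORT A =====
-- literal port of A's while loop, threading marked/current/k
def A151821_loop (n : Int) (marked : List Int) (current k : Int) : List Int :=
  if h : (marked.length : Int) < n then
    let k' := k + PySem.Int.floordiv ((k + 1) * current) k
    A151821_loop n (marked ++ [k' + 1]) (current + current + 1) k'
  else marked
termination_by (n - marked.length).toNat
decreasing_by simp; omega

def A151821 (n : Int) : List Int :=
  [1] ++ A151821_loop n [] 1 1

-- ===== PORT B =====
-- B: [1] + [1 << i for i in range(2, n + 2)]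
def A151821_alt (n : Int) : List Int :=
  [1] ++ (PySem.List.pyRange 2 (n + 2) 1).map (fun i => 2 ^ i.toNat)

-- ===== PRECONDITION & SPEC =====
def Spec_A151821 (n : Int) (out : List Int) : Prop := out = A151821_alt n
instance (n : Int) (out : List Int) : Decidable (Spec_A151821 n out) := by unfold Spec_A151821; infer_instance

-- ===== CLAIM (what is proved, stated in full; the proofs are below) =====
def Claim_equal_A151821 : Prop := ∀ (n : Int), Dom_A151821 n → Spec_A151821 n (A151821 n)

-- ===== LEMMAS AND PROOFS =====

-- loop invariant: with k = current = 2^(m+1) - 1 and |marked| = m, the loop appends exactly 2^i for i = m+2 .. n+1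
lemma A151821_loop_eq (n : Int) (t : Nat) :
    ∀ (m : Nat) (marked : List Int), marked.length = m → t = (n - m).toNat →
      A151821_loop n marked (2 ^ (m + 1) - 1) (2 ^ (m + 1) - 1)
        = marked ++ (PySem.List.pyRange ((m : Int) + 2) (n + 2) 1).map (fun i => 2 ^ i.toNat) := by
  induction t with
  | zero =>
    intro m marked hlen ht
    have hle : n ≤ (m : Int) := by omega
    rw [A151821_loop]
    rw [dif_neg (by rw [hlen]; omega)]
    rw [PySem.List.pyRange_one_eq_nil (by omega)]
    simp
  | succ t ih =>
    intro m marked hlen ht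
    have hlt : (m : Int) < n := by omega
    set K : Int := 2 ^ (m + 1) - 1 with hK
    have hKpos : 0 < K := by
      have h1 : (0 : Int) < 2 ^ m := by positivity
      have h2 : (2 : Int) ^ (m + 1) = 2 ^ m * 2 := pow_succ 2 m
      omega
    rw [A151821_loop]
    rw [dif_pos (by rw [hlen]; exact_mod_cast hlt)]
    have hdiv : PySem.Int.floordiv ((K + 1) * K) K = K + 1 := by
      rw [PySem.Int.floordiv_eq_ediv_of_pos hKpos]
      exact Int.mul_ediv_cancel _ (by omega)
    rw [hdiv]
    have hnext : K + (K + 1) = 2 ^ (m + 1 + 1) - 1 := by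
      rw [hK]; ring
    have hcur : K + K + 1 = 2 ^ (m + 1 + 1) - 1 := by
      rw [hK]; ring
    rw [hnext, hcur]
    have := ih (m + 1) (marked ++ [K + (K + 1) + 1]) (by simp [hlen]) (by omega)
    rw [hnext] at this
    rw [this]
    rw [PySem.List.pyRange_one_cons (by omega : ((m : Int) + 2) < n + 2)]
    have htn : (((m : Int) + 2)).toNat = m + 2 := by omega
    simp [htn, pow_succ]
    congr 2

theorem A151821_equal (n : Int) : A151821 n = A151821_alt n := by
  unfold A151821 A151821_alt
  have := A151821_loop_eq n (n - 0).toNat 0 [] rfl (by simp)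
  norm_num at this
  rw [this]

-- ===== VERDICT (by name: the statement is the Claim_ definition above) =====
theorem A151821_spec : Claim_equal_A151821 := by
  intro n _
  unfold Spec_A151821
  exact A151821_equal n
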